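-- pv_equiv track=rewrite | github.com/thebharathkumar/cursorprotest | api/resume_enhancer.py | _pick_verb
-- ===== SOURCE A (Python) =====
-- def _pick_verb(context: str) -> str:
--     """Pick a strong action verb that roughly fits the context."""
--     ctx = context.lower()
--     if any(w in ctx for w in ("team", "engineer", "report", "junior", "staff")):
--         return "Led"
--     if any(w in ctx for w in ("cost", "time", "reduc", "efficien", "optim")):
--         return "Optimized"
--     if any(w in ctx for w in ("system", "platform", "service", "application", "tool")):
--         return "Developed"
--     if any(w in ctx for w in ("process", "workflow", "pipeline")):
--         return "Streamlined"
--     if any(w in ctx for w in ("launch", "releas", "deploy", "ship")):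
--         return "Launched"
--     if any(w in ctx for w in ("revenue", "growth", "sales", "metric")):
--         return "Drove"
--     if any(w in ctx for w in ("design", "architect", "plan")):
--         return "Designed"
--     return "Delivered"
-- ===== SOURCE B (Python) =====
-- _VERBS = ("Led", "Optimized", "Developed", "Streamlined", "Launched",
--           "Drove", "Designed", "Delivered")
--
-- _KEYWORDS = (
--     ("team", 0), ("engineer", 0), ("report", 0), ("junior", 0), ("staff", 0),
--     ("cost", 1), ("time", 1), ("reduc", 1), ("efficien", 1), ("optim", 1),
--     ("system", 2), ("platform", 2), ("service", 2), ("application", 2), ("tool", 2),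
--     ("process", 3), ("workflow", 3), ("pipeline", 3),
--     ("launch", 4), ("releas", 4), ("deploy", 4), ("ship", 4),
--     ("revenue", 5), ("growth", 5), ("sales", 5), ("metric", 5),
--     ("design", 6), ("architect", 6), ("plan", 6),
-- )
--
-- def _pick_verb(context: str) -> str:
--     """Pick a strong action verb that roughly fits the context.
--
--     Single left-to-right scan: at each position of the lowered text, note any
--     keyword starting there and keep the lowest rank seen; the rank indexes the
--     verb table ("Delivered" is rank 7, the no-match default)."""
--     ctx = context.lower()
--     best = 7
--     for i in range(len(ctx)):
--         for w, r in _KEYWORDS: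
--             if r < best and ctx.startswith(w, i):
--                 best = r
--     return _VERBS[best]
-- ===== Notes on version B (the rewrite author's own statement) =====
-- stated objective: alternative
-- what changed: Replaces A's priority-ordered chain of per-group substring searches by a single left-to-right scan over the lowered text that, at each position, records any keyword starting there and keeps the minimum rank, which then indexes a verb table; it trades A's early exit for one uniform pass.
import Mathlib
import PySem

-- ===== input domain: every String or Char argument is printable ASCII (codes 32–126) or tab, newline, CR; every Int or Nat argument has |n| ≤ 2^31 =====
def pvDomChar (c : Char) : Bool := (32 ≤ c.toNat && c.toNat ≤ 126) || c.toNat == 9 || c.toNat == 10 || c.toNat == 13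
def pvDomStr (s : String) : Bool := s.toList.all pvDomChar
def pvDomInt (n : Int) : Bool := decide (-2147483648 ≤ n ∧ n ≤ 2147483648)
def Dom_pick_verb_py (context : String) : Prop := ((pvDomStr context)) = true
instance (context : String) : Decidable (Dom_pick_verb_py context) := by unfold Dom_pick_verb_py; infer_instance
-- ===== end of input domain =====

-- B replaces A's priority-ordered chain of substring searches by one left-to-right
-- position scan keeping the minimum keyword rank (objective: alternative).

-- ===== PORT A =====
def pick_verb_py (context : String) : String :=
  let ctx := PySem.Str.lower context
  if ["team", "engineer", "report", "junior", "staff"].any (fun w => PySem.Str.isIn w ctx) then "Led"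
  else if ["cost", "time", "reduc", "efficien", "optim"].any (fun w => PySem.Str.isIn w ctx) then "Optimized"
  else if ["system", "platform", "service", "application", "tool"].any (fun w => PySem.Str.isIn w ctx) then "Developed"
  else if ["process", "workflow", "pipeline"].any (fun w => PySem.Str.isIn w ctx) then "Streamlined"
  else if ["launch", "releas", "deploy", "ship"].any (fun w => PySem.Str.isIn w ctx) then "Launched"
  else if ["revenue", "growth", "sales", "metric"].any (fun w => PySem.Str.isIn w ctx) then "Drove"
  else if ["design", "architect", "plan"].any (fun w => PySem.Str.isIn w ctx) then "Designed"
  else "Delivered"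

-- ===== PORT B =====
def pvVerbs : List String :=
  ["Led", "Optimized", "Developed", "Streamlined", "Launched", "Drove", "Designed", "Delivered"]

def pvKeywords : List (List Char × Int) :=
  [("team".toList, 0), ("engineer".toList, 0), ("report".toList, 0), ("junior".toList, 0), ("staff".toList, 0),
   ("cost".toList, 1), ("time".toList, 1), ("reduc".toList, 1), ("efficien".toList, 1), ("optim".toList, 1),
   ("system".toList, 2), ("platform".toList, 2), ("service".toList, 2), ("application".toList, 2), ("tool".toList, 2),
   ("process".toList, 3), ("workflow".toList, 3), ("pipeline".toList, 3),
   ("launch".toList, 4), ("releas".toList, 4), ("deploy".toList, 4), ("ship".toList, 4),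
   ("revenue".toList, 5), ("growth".toList, 5), ("sales".toList, 5), ("metric".toList, 5),
   ("design".toList, 6), ("architect".toList, 6), ("plan".toList, 6)]

-- Port of Source B: range(len(ctx)) is List.range; ctx.startswith(w, i) with 0 ≤ i ≤ len(ctx)
-- is exactly w.isPrefixOf (ctx.drop i); _VERBS[best] is pyGetD (best is always 0..7).
def pick_verb_py_alt (context : String) : String :=
  let ctx := PySem.Chars.lower context.toList
  let best := (List.range ctx.length).foldl
      (fun best i =>
        pvKeywords.foldl
          (fun b p => if decide (p.2 < b) && p.1.isPrefixOf (ctx.drop i) then p.2 else b) best)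
      7
  PySem.List.pyGetD pvVerbs best ""

-- ===== PRECONDITION & SPEC =====
def Spec_pick_verb_py (context : String) (out : String) : Prop := out = pick_verb_py_alt context
instance (context : String) (out : String) : Decidable (Spec_pick_verb_py context out) := by unfold Spec_pick_verb_py; infer_instance

-- ===== CLAIM (what is proved, stated in full; the proofs are below) =====
def Claim_equal_pick_verb_py : Prop := ∀ (context : String), Dom_pick_verb_py context → Spec_pick_verb_py context (pick_verb_py context)

-- ===== LEMMAS AND PROOFS =====

-- the multiset of ranks of keyword occurrences anywhere in ctx
def pvHits (ctx : List Char) : List Int :=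
  (List.range ctx.length).flatMap
    (fun i => (pvKeywords.filter (fun p => p.1.isPrefixOf (ctx.drop i))).map (·.2))

theorem pv_inner_step (ctx : List Char) (i : Nat) (b : Int) (p : List Char × Int) :
    (if decide (p.2 < b) && p.1.isPrefixOf (ctx.drop i) then p.2 else b)
      = (if p.1.isPrefixOf (ctx.drop i) then min b p.2 else b) := by
  by_cases h : p.1.isPrefixOf (ctx.drop i) = true
  · simp [h]; split_ifs <;> omega
  · simp [h]

theorem pv_foldl_min_filter {α : Type} (c : α → Bool) (f : α → Int) :
    ∀ (l : List α) (b : Int),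
      l.foldl (fun b x => if c x then min b (f x) else b) b
        = ((l.filter c).map f).foldl min b := by
  intro l
  induction l with
  | nil => intro b; rfl
  | cons x xs ih =>
      intro b
      by_cases h : c x = true <;> simp [h, ih]

theorem pv_foldl_min_flat {α : Type} (g : α → List Int) :
    ∀ (l : List α) (b : Int),
      l.foldl (fun b i => (g i).foldl min b) b = (l.flatMap g).foldl min b := by
  intro l
  induction l with
  | nil => intro b; rfl
  | cons x xs ih => intro b; simp [List.flatMap_cons, List.foldl_append, ih]

theorem pv_foldl_min_le_init : ∀ (M : List Int) (b : Int), M.foldl min b ≤ b := by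
  intro M
  induction M with
  | nil => intro b; simp
  | cons x xs ih =>
      intro b
      calc xs.foldl min (min b x) ≤ min b x := ih _
        _ ≤ b := min_le_left _ _

theorem pv_foldl_min_le_mem : ∀ (M : List Int) (b x : Int), x ∈ M → M.foldl min b ≤ x := by
  intro M
  induction M with
  | nil => intro b x hx; simp at hx
  | cons y ys ih =>
      intro b x hx
      rcases List.mem_cons.mp hx with h | h
      · subst h
        calc ys.foldl min (min b x) ≤ min b x := pv_foldl_min_le_init _ _
          _ ≤ x := min_le_right _ _
      · exact ih _ _ h

theorem pv_foldl_min_mem_or : ∀ (M : List Int) (b : Int),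
    M.foldl min b = b ∨ M.foldl min b ∈ M := by
  intro M
  induction M with
  | nil => intro b; left; rfl
  | cons y ys ih =>
      intro b
      rcases ih (min b y) with h | h
      · simp only [List.foldl_cons, h]
        rcases le_total b y with hby | hyb
        · left; exact min_eq_left hby
        · right; simp [min_eq_right hyb]
      · right; exact List.mem_cons_of_mem _ h

-- ∃ position i < len where w starts  ↔  w occurs as infix (w nonempty)
theorem pv_exists_start_iff (ctx w : List Char) (hw : w ≠ []) :
    (∃ i < ctx.length, w.isPrefixOf (ctx.drop i) = true) ↔ PySem.Chars.isIn w ctx = true := by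
  rw [← PySem.Chars.exists_prefix_drop_iff_isIn]
  constructor
  · rintro ⟨i, _, h⟩
    exact ⟨i, List.isPrefixOf_iff_prefix.mp h⟩
  · rintro ⟨j, hj⟩
    by_cases hjn : j < ctx.length
    · exact ⟨j, hjn, List.isPrefixOf_iff_prefix.mpr hj⟩
    · exfalso
      have : ctx.drop j = [] := List.drop_eq_nil_of_le (by omega)
      rw [this] at hj
      exact hw (List.prefix_nil.mp hj)

theorem pv_mem_hits_iff (ctx : List Char) (r : Int) :
    r ∈ pvHits ctx ↔ ∃ p ∈ pvKeywords, p.2 = r ∧ PySem.Chars.isIn p.1 ctx = true := by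
  unfold pvHits
  simp only [List.mem_flatMap, List.mem_map, List.mem_filter, List.mem_range]
  constructor
  · rintro ⟨i, hi, p, ⟨hp, hpre⟩, hr⟩
    have hne : p.1 ≠ [] := by
      revert hp; unfold pvKeywords; intro hp
      fin_cases hp <;> simp
    exact ⟨p, hp, hr, (pv_exists_start_iff ctx p.1 hne).mp ⟨i, hi, hpre⟩⟩
  · rintro ⟨p, hp, hr, hin⟩
    have hne : p.1 ≠ [] := by
      revert hp; unfold pvKeywords; intro hp
      fin_cases hp <;> simp
    obtain ⟨i, hi, hpre⟩ := (pv_exists_start_iff ctx p.1 hne).mpr hin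
    exact ⟨i, hi, p, ⟨hp, hpre⟩, hr⟩

theorem pv_hits_bounds (ctx : List Char) (r : Int) (h : r ∈ pvHits ctx) : 0 ≤ r ∧ r ≤ 6 := by
  obtain ⟨p, hp, hr, -⟩ := (pv_mem_hits_iff ctx r).mp h
  subst hr
  revert hp; unfold pvKeywords; intro hp
  fin_cases hp <;> simp

-- B's accumulator equals the fold of min over pvHits
theorem pv_best_eq (ctx : List Char) :
    (List.range ctx.length).foldl
      (fun best i =>
        pvKeywords.foldl
          (fun b p => if decide (p.2 < b) && p.1.isPrefixOf (ctx.drop i) then p.2 else b) best)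
      7 = (pvHits ctx).foldl min 7 := by
  unfold pvHits
  rw [← pv_foldl_min_flat]
  simp only [pv_inner_step, pv_foldl_min_filter]

theorem pv_g0 (context : String) :
    ((["team","engineer","report","junior","staff"] : List String).any (fun w => PySem.Str.isIn w (PySem.Str.lower context)) = true)
      ↔ (0:Int) ∈ pvHits (PySem.Chars.lower context.toList) := by
  rw [pv_mem_hits_iff]; simp [pvKeywords]

theorem pv_g1 (context : String) :
    ((["cost","time","reduc","efficien","optim"] : List String).any (fun w => PySem.Str.isIn w (PySem.Str.lower context)) = true)
      ↔ (1:Int) ∈ pvHits (PySem.Chars.lower context.toList) := by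
  rw [pv_mem_hits_iff]; simp [pvKeywords]

theorem pv_g2 (context : String) :
    ((["system","platform","service","application","tool"] : List String).any (fun w => PySem.Str.isIn w (PySem.Str.lower context)) = true)
      ↔ (2:Int) ∈ pvHits (PySem.Chars.lower context.toList) := by
  rw [pv_mem_hits_iff]; simp [pvKeywords]

theorem pv_g3 (context : String) :
    ((["process","workflow","pipeline"] : List String).any (fun w => PySem.Str.isIn w (PySem.Str.lower context)) = true)
      ↔ (3:Int) ∈ pvHits (PySem.Chars.lower context.toList) := by
  rw [pv_mem_hits_iff]; simp [pvKeywords]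

theorem pv_g4 (context : String) :
    ((["launch","releas","deploy","ship"] : List String).any (fun w => PySem.Str.isIn w (PySem.Str.lower context)) = true)
      ↔ (4:Int) ∈ pvHits (PySem.Chars.lower context.toList) := by
  rw [pv_mem_hits_iff]; simp [pvKeywords]

theorem pv_g5 (context : String) :
    ((["revenue","growth","sales","metric"] : List String).any (fun w => PySem.Str.isIn w (PySem.Str.lower context)) = true)
      ↔ (5:Int) ∈ pvHits (PySem.Chars.lower context.toList) := by
  rw [pv_mem_hits_iff]; simp [pvKeywords]

theorem pv_g6 (context : String) :
    ((["design","architect","plan"] : List String).any (fun w => PySem.Str.isIn w (PySem.Str.lower context)) = true)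
      ↔ (6:Int) ∈ pvHits (PySem.Chars.lower context.toList) := by
  rw [pv_mem_hits_iff]; simp [pvKeywords]
-- ===== VERDICT (by name: the statement is the Claim_ definition above) =====
theorem pick_verb_py_spec : Claim_equal_pick_verb_py := by
  intro context _
  unfold Spec_pick_verb_py pick_verb_py pick_verb_py_alt
  simp only [pv_best_eq]
  have hmem : (pvHits (PySem.Chars.lower context.toList)).foldl min 7 = 7 ∨
      (pvHits (PySem.Chars.lower context.toList)).foldl min 7 ∈ pvHits (PySem.Chars.lower context.toList) :=
    pv_foldl_min_mem_or _ _
  split_ifs with h0 h1 h2 h3 h4 h5 h6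
  · have hin := (pv_g0 context).mp h0
    have hle := pv_foldl_min_le_mem _ 7 _ hin
    have hm : (pvHits (PySem.Chars.lower context.toList)).foldl min 7 ∈ pvHits (PySem.Chars.lower context.toList) := by
      rcases hmem with h | h
      · exfalso; omega
      · exact h
    have hge := (pv_hits_bounds _ _ hm).1
    have hval : (pvHits (PySem.Chars.lower context.toList)).foldl min 7 = 0 := by omega
    rw [hval]; decide
  · have hin := (pv_g1 context).mp h1
    have hle := pv_foldl_min_le_mem _ 7 _ hin
    have hm : (pvHits (PySem.Chars.lower context.toList)).foldl min 7 ∈ pvHits (PySem.Chars.lower context.toList) := by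
      rcases hmem with h | h
      · exfalso; omega
      · exact h
    have hge := (pv_hits_bounds _ _ hm).1
    have hne0 : (pvHits (PySem.Chars.lower context.toList)).foldl min 7 ≠ 0 := fun h => h0 ((pv_g0 context).mpr (h ▸ hm))
    have hval : (pvHits (PySem.Chars.lower context.toList)).foldl min 7 = 1 := by omega
    rw [hval]; decide
  · have hin := (pv_g2 context).mp h2
    have hle := pv_foldl_min_le_mem _ 7 _ hin
    have hm : (pvHits (PySem.Chars.lower context.toList)).foldl min 7 ∈ pvHits (PySem.Chars.lower context.toList) := by
      rcases hmem with h | h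
      · exfalso; omega
      · exact h
    have hge := (pv_hits_bounds _ _ hm).1
    have hne0 : (pvHits (PySem.Chars.lower context.toList)).foldl min 7 ≠ 0 := fun h => h0 ((pv_g0 context).mpr (h ▸ hm))
    have hne1 : (pvHits (PySem.Chars.lower context.toList)).foldl min 7 ≠ 1 := fun h => h1 ((pv_g1 context).mpr (h ▸ hm))
    have hval : (pvHits (PySem.Chars.lower context.toList)).foldl min 7 = 2 := by omega
    rw [hval]; decide
  · have hin := (pv_g3 context).mp h3
    have hle := pv_foldl_min_le_mem _ 7 _ hin
    have hm : (pvHits (PySem.Chars.lower context.toList)).foldl min 7 ∈ pvHits (PySem.Chars.lower context.toList) := by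
      rcases hmem with h | h
      · exfalso; omega
      · exact h
    have hge := (pv_hits_bounds _ _ hm).1
    have hne0 : (pvHits (PySem.Chars.lower context.toList)).foldl min 7 ≠ 0 := fun h => h0 ((pv_g0 context).mpr (h ▸ hm))
    have hne1 : (pvHits (PySem.Chars.lower context.toList)).foldl min 7 ≠ 1 := fun h => h1 ((pv_g1 context).mpr (h ▸ hm))
    have hne2 : (pvHits (PySem.Chars.lower context.toList)).foldl min 7 ≠ 2 := fun h => h2 ((pv_g2 context).mpr (h ▸ hm))
    have hval : (pvHits (PySem.Chars.lower context.toList)).foldl min 7 = 3 := by omega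
    rw [hval]; decide
  · have hin := (pv_g4 context).mp h4
    have hle := pv_foldl_min_le_mem _ 7 _ hin
    have hm : (pvHits (PySem.Chars.lower context.toList)).foldl min 7 ∈ pvHits (PySem.Chars.lower context.toList) := by
      rcases hmem with h | h
      · exfalso; omega
      · exact h
    have hge := (pv_hits_bounds _ _ hm).1
    have hne0 : (pvHits (PySem.Chars.lower context.toList)).foldl min 7 ≠ 0 := fun h => h0 ((pv_g0 context).mpr (h ▸ hm))
    have hne1 : (pvHits (PySem.Chars.lower context.toList)).foldl min 7 ≠ 1 := fun h => h1 ((pv_g1 context).mpr (h ▸ hm))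
    have hne2 : (pvHits (PySem.Chars.lower context.toList)).foldl min 7 ≠ 2 := fun h => h2 ((pv_g2 context).mpr (h ▸ hm))
    have hne3 : (pvHits (PySem.Chars.lower context.toList)).foldl min 7 ≠ 3 := fun h => h3 ((pv_g3 context).mpr (h ▸ hm))
    have hval : (pvHits (PySem.Chars.lower context.toList)).foldl min 7 = 4 := by omega
    rw [hval]; decide
  · have hin := (pv_g5 context).mp h5
    have hle := pv_foldl_min_le_mem _ 7 _ hin
    have hm : (pvHits (PySem.Chars.lower context.toList)).foldl min 7 ∈ pvHits (PySem.Chars.lower context.toList) := by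
      rcases hmem with h | h
      · exfalso; omega
      · exact h
    have hge := (pv_hits_bounds _ _ hm).1
    have hne0 : (pvHits (PySem.Chars.lower context.toList)).foldl min 7 ≠ 0 := fun h => h0 ((pv_g0 context).mpr (h ▸ hm))
    have hne1 : (pvHits (PySem.Chars.lower context.toList)).foldl min 7 ≠ 1 := fun h => h1 ((pv_g1 context).mpr (h ▸ hm))
    have hne2 : (pvHits (PySem.Chars.lower context.toList)).foldl min 7 ≠ 2 := fun h => h2 ((pv_g2 context).mpr (h ▸ hm))
    have hne3 : (pvHits (PySem.Chars.lower context.toList)).foldl min 7 ≠ 3 := fun h => h3 ((pv_g3 context).mpr (h ▸ hm))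
    have hne4 : (pvHits (PySem.Chars.lower context.toList)).foldl min 7 ≠ 4 := fun h => h4 ((pv_g4 context).mpr (h ▸ hm))
    have hval : (pvHits (PySem.Chars.lower context.toList)).foldl min 7 = 5 := by omega
    rw [hval]; decide
  · have hin := (pv_g6 context).mp h6
    have hle := pv_foldl_min_le_mem _ 7 _ hin
    have hm : (pvHits (PySem.Chars.lower context.toList)).foldl min 7 ∈ pvHits (PySem.Chars.lower context.toList) := by
      rcases hmem with h | h
      · exfalso; omega
      · exact h
    have hge := (pv_hits_bounds _ _ hm).1
    have hne0 : (pvHits (PySem.Chars.lower context.toList)).foldl min 7 ≠ 0 := fun h => h0 ((pv_g0 context).mpr (h ▸ hm))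
    have hne1 : (pvHits (PySem.Chars.lower context.toList)).foldl min 7 ≠ 1 := fun h => h1 ((pv_g1 context).mpr (h ▸ hm))
    have hne2 : (pvHits (PySem.Chars.lower context.toList)).foldl min 7 ≠ 2 := fun h => h2 ((pv_g2 context).mpr (h ▸ hm))
    have hne3 : (pvHits (PySem.Chars.lower context.toList)).foldl min 7 ≠ 3 := fun h => h3 ((pv_g3 context).mpr (h ▸ hm))
    have hne4 : (pvHits (PySem.Chars.lower context.toList)).foldl min 7 ≠ 4 := fun h => h4 ((pv_g4 context).mpr (h ▸ hm))
    have hne5 : (pvHits (PySem.Chars.lower context.toList)).foldl min 7 ≠ 5 := fun h => h5 ((pv_g5 context).mpr (h ▸ hm))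
    have hval : (pvHits (PySem.Chars.lower context.toList)).foldl min 7 = 6 := by omega
    rw [hval]; decide
  · rcases hmem with h | h
    · rw [h]; decide
    · exfalso
      have hb := pv_hits_bounds _ _ h
      have hne0 : (pvHits (PySem.Chars.lower context.toList)).foldl min 7 ≠ 0 := fun hh => h0 ((pv_g0 context).mpr (hh ▸ h))
      have hne1 : (pvHits (PySem.Chars.lower context.toList)).foldl min 7 ≠ 1 := fun hh => h1 ((pv_g1 context).mpr (hh ▸ h))
      have hne2 : (pvHits (PySem.Chars.lower context.toList)).foldl min 7 ≠ 2 := fun hh => h2 ((pv_g2 context).mpr (hh ▸ h))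
      have hne3 : (pvHits (PySem.Chars.lower context.toList)).foldl min 7 ≠ 3 := fun hh => h3 ((pv_g3 context).mpr (hh ▸ h))
      have hne4 : (pvHits (PySem.Chars.lower context.toList)).foldl min 7 ≠ 4 := fun hh => h4 ((pv_g4 context).mpr (hh ▸ h))
      have hne5 : (pvHits (PySem.Chars.lower context.toList)).foldl min 7 ≠ 5 := fun hh => h5 ((pv_g5 context).mpr (hh ▸ h))
      have hne6 : (pvHits (PySem.Chars.lower context.toList)).foldl min 7 ≠ 6 := fun hh => h6 ((pv_g6 context).mpr (hh ▸ h))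
      omega
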